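-- pv_equiv track=rewrite | github.com/MikhailLosev/pract1 | Lab1/p1.py | recurce_func
-- ===== SOURCE A (Python) =====
-- def recurce_func(k:int, summ:int, s:int, x:list)->bool:
--     if summ == s:
--         return True
--     if k == 0:
--         return summ == s
--
--     '''Меняем знаки'''
--     x[k] = -x[k]
--     if recurce_func(k-1, summ+2*x[k], s, x):
--          return True
--     x[k] = -x[k]
--     if recurce_func(k-1, summ, s, x):
--         return True
--     return False
-- ===== SOURCE B (Python) =====
-- def recurce_func(k: int, summ: int, s: int, x: list) -> bool:
--     # Meet-in-the-middle over the sign-flippable elements x[1..k].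
--     # A returns True iff flipping the signs of some subset S of x[1..k]
--     # changes summ into s, i.e. summ - 2*sum(S) == s.
--     diff = summ - s
--     if diff % 2:
--         return False
--     target = diff // 2
--     vals = x[1:k + 1]
--     mid = len(vals) // 2
--
--     def subset_sums(vs):
--         sums = {0}
--         for v in vs:
--             sums |= {a + v for a in sums}
--         return sums
--
--     left = subset_sums(vals[:mid])
--     right = subset_sums(vals[mid:])
--     return any(target - a in right for a in left)
-- ===== Notes on version B (the rewrite author's own statement) =====
-- stated objective: faster
-- what changed: Replaces the exponential sign-flip recursion with a meet-in-the-middle subset-sum check: the flippable segment x[1:k+1] is split in half, the reachable subset sums of each half are collected in sets once, and the target (summ-s)/2 is matched across the halves. Pre_ restricts to the natural domain 0 <= k < len(x) (plus summ==s and k==0, where A returns without indexing): other k make A raise IndexError or recurse through negative-index wraparound, where any returned value is an accident.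
-- outside the precondition, e.g. on recurce_func(3, 0, 5, [1, 2, 3]): A raises IndexError, B returns False; on recurce_func(-1, 10, 0, [5]): A returns True, B returns False
import Mathlib
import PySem

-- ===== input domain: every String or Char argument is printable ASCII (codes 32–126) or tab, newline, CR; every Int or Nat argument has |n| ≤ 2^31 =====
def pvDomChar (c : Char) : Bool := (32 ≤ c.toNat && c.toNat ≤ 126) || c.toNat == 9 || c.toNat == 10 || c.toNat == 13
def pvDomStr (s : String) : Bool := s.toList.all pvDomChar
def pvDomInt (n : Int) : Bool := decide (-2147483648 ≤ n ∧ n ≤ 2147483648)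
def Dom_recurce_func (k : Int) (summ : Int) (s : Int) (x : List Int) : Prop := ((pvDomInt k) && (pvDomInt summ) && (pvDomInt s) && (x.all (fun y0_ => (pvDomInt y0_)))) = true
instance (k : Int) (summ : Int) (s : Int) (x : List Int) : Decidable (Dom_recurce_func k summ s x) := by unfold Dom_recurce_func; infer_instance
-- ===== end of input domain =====

-- B replaces A's O(2^k) sign-flip recursion by a meet-in-the-middle subset-sum check (objective: faster).
-- A mutates x in place (sign flips are left behind when it returns True mid-search); the equivalence
-- proved here is about the RETURN value only — B never mutates x.

-- ===== PORT A =====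
-- literal port of A's recursion; x[k] = -x[k] is pySetD, the recursion runs on the mutated list.
-- Python raises IndexError exactly where pyGet? is none (Pre_ excludes those inputs); `false` there is never reached under Pre_.
def recurce_func (k : Int) (summ : Int) (s : Int) (x : List Int) : Bool :=
  if summ = s then true
  else if k = 0 then decide (summ = s)
  else
    match h : PySem.List.pyGet? x k with
    | none => false                       -- Python: IndexError (outside Pre_)
    | some xk0 =>
      -- x[k] = -x[k]  (the flipped value is -xk0; summ + 2*x[k] reads the NEW x[k])
      let x1 := PySem.List.pySetD x k (-xk0)
      if recurce_func (k - 1) (summ + 2 * (-xk0)) s x1 then true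
      else
        -- x[k] = -x[k]  (flip back)
        let x2 := PySem.List.pySetD x1 k xk0
        if recurce_func (k - 1) summ s x2 then true
        else false
termination_by (k + x.length + 1).toNat
decreasing_by
  · have hin : PySem.Raise.InRange x.length k := by
      by_contra hc
      rw [← PySem.List.pyGet?_eq_none_iff x k] at hc
      simp [hc] at h
    have hb : -(x.length : Int) ≤ k ∧ k < x.length := hin
    have hl : (PySem.List.pySetD x k (-xk0)).length = x.length := PySem.List.length_pySetD x k (-xk0)
    omega
  · have hin : PySem.Raise.InRange x.length k := by
      by_contra hc
      rw [← PySem.List.pyGet?_eq_none_iff x k] at hc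
      simp [hc] at h
    have hb : -(x.length : Int) ≤ k ∧ k < x.length := hin
    have hl1 : (PySem.List.pySetD x k (-xk0)).length = x.length := PySem.List.length_pySetD x k (-xk0)
    have hl2 : (PySem.List.pySetD (PySem.List.pySetD x k (-xk0)) k xk0).length = (PySem.List.pySetD x k (-xk0)).length :=
      PySem.List.length_pySetD _ k xk0
    omega

-- ===== PORT B =====
-- subset_sums(vs): the set of all subset sums of vs ( sums |= {a + v for a in sums} )
def pvSubsetSums (vs : List Int) : PySem.Set Int :=
  vs.foldl (fun sums v => PySem.Set.union sums (PySem.Set.ofList (sums.map (fun a => a + v)))) (PySem.Set.ofList [0])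

def recurce_func_alt (k : Int) (summ : Int) (s : Int) (x : List Int) : Bool :=
  let diff := summ - s
  if PySem.Int.mod diff 2 ≠ 0 then false
  else
    let target := PySem.Int.floordiv diff 2
    let vals := PySem.List.slice x (some 1) (some (k + 1))
    let mid : Int := PySem.Int.floordiv (vals.length : Int) 2
    let left := pvSubsetSums (PySem.List.slice vals none (some mid))
    let right := pvSubsetSums (PySem.List.slice vals (some mid) none)
    left.any (fun a => PySem.Set.contains right (target - a))

-- ===== PRECONDITION & SPEC =====
-- Pre_ restricts k to the natural domain 0 ≤ k < len(x) of the sign-flip search (plus the cases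
-- summ == s and k == 0, where A returns without ever indexing): for any other k Python A either
-- raises IndexError outright (k ≥ len(x) or k < -len(x)) or recurses through negative-index
-- wraparound, where it raises unless an accidental wrapped prefix happens to hit s first.
def Pre_recurce_func (k : Int) (summ : Int) (s : Int) (x : List Int) : Prop :=
  summ = s ∨ k = 0 ∨ (0 ≤ k ∧ k < x.length)
instance (k : Int) (summ : Int) (s : Int) (x : List Int) : Decidable (Pre_recurce_func k summ s x) := by unfold Pre_recurce_func; infer_instance

def pvWitness_recurce_func : Int × Int × Int × List Int := (2, 5, 1, [0, 1, 1])

def Spec_recurce_func (k : Int) (summ : Int) (s : Int) (x : List Int) (out : Bool) : Prop := out = recurce_func_alt k summ s x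
instance (k : Int) (summ : Int) (s : Int) (x : List Int) (out : Bool) : Decidable (Spec_recurce_func k summ s x out) := by unfold Spec_recurce_func; infer_instance

-- ===== CLAIM (what is proved, stated in full; the proofs are below) =====
def Claim_equal_recurce_func : Prop := ∀ (k : Int) (summ : Int) (s : Int) (x : List Int), Dom_recurce_func k summ s x → Pre_recurce_func k summ s x → Spec_recurce_func k summ s x (recurce_func k summ s x)

-- ===== LEMMAS AND PROOFS =====

-- `pvCanSum l t` : t is a subset sum of l
def pvCanSum : List Int → Int → Prop
  | [], t => t = 0
  | v :: l, t => pvCanSum l (t - v) ∨ pvCanSum l t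

theorem pvCanSum_zero (l : List Int) : pvCanSum l 0 := by
  induction l with
  | nil => rfl
  | cons v l ih => exact Or.inr ih

theorem pvCanSum_concat (l : List Int) (v t : Int) :
    pvCanSum (l ++ [v]) t ↔ pvCanSum l (t - v) ∨ pvCanSum l t := by
  induction l generalizing t with
  | nil => simp [pvCanSum]
  | cons w l ih =>
    simp only [List.cons_append, pvCanSum, ih]
    rw [show t - w - v = t - v - w from by ring]
    tauto

theorem pvCanSum_append (u w : List Int) (t : Int) :
    pvCanSum (u ++ w) t ↔ ∃ a, pvCanSum u a ∧ pvCanSum w (t - a) := by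
  induction u generalizing t with
  | nil =>
    constructor
    · intro h; exact ⟨0, rfl, by simpa using h⟩
    · rintro ⟨a, ha, hw⟩
      simp only [pvCanSum] at ha
      subst ha; simpa using hw
  | cons v u ih =>
    simp only [List.cons_append, pvCanSum, ih]
    constructor
    · rintro (⟨a, ha, hw⟩ | ⟨a, ha, hw⟩)
      · refine ⟨a + v, Or.inl ?_, ?_⟩
        · rwa [show a + v - v = a from by ring]
        · rwa [show t - (a + v) = t - v - a from by ring]
      · exact ⟨a, Or.inr ha, hw⟩
    · rintro ⟨a, ha | ha, hw⟩
      · refine Or.inl ⟨a - v, ha, ?_⟩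
        rwa [show t - v - (a - v) = t - a from by ring]
      · exact Or.inr ⟨a, ha, hw⟩

theorem mem_foldl_sums (vs : List Int) (acc : List Int) (t : Int) :
    t ∈ vs.foldl (fun sums v => PySem.Set.union sums (PySem.Set.ofList (sums.map (fun a => a + v)))) acc
      ↔ ∃ a ∈ acc, pvCanSum vs (t - a) := by
  induction vs generalizing acc with
  | nil =>
    simp only [List.foldl_nil, pvCanSum]
    constructor
    · intro h; exact ⟨t, h, by ring⟩
    · rintro ⟨a, ha, h⟩
      have : t = a := by omega
      rwa [this]
  | cons v vs ih =>
    simp only [List.foldl_cons, ih, pvCanSum]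
    constructor
    · rintro ⟨a, ha, h⟩
      rw [PySem.Set.mem_union] at ha
      rcases ha with ha | ha
      · exact ⟨a, ha, Or.inr h⟩
      · rw [PySem.Set.mem_ofList] at ha
        simp only [List.mem_map] at ha
        obtain ⟨b, hb, rfl⟩ := ha
        refine ⟨b, hb, Or.inl ?_⟩
        rwa [show t - b - v = t - (b + v) from by ring]
    · rintro ⟨a, ha, h | h⟩
      · refine ⟨a + v, ?_, ?_⟩
        · rw [PySem.Set.mem_union, PySem.Set.mem_ofList]
          exact Or.inr (List.mem_map.mpr ⟨a, ha, rfl⟩)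
        · rwa [show t - (a + v) = t - a - v from by ring]
      · exact ⟨a, by rw [PySem.Set.mem_union]; exact Or.inl ha, h⟩

theorem mem_pvSubsetSums (vs : List Int) (t : Int) :
    t ∈ pvSubsetSums vs ↔ pvCanSum vs t := by
  rw [pvSubsetSums, mem_foldl_sums]
  constructor
  · rintro ⟨a, ha, h⟩
    rw [PySem.Set.mem_ofList] at ha
    simp only [List.mem_singleton] at ha
    subst ha; simpa using h
  · intro h
    refine ⟨0, ?_, by simpa using h⟩
    rw [PySem.Set.mem_ofList]; simp

-- characterization of B: true iff some subset sum t of x[1:k+1] has summ - 2t = s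
theorem B_char (k summ s : Int) (x : List Int) :
    recurce_func_alt k summ s x = true ↔
      ∃ t, pvCanSum (PySem.List.slice x (some 1) (some (k + 1))) t ∧ summ - 2 * t = s := by
  have hB : recurce_func_alt k summ s x =
      (if PySem.Int.mod (summ - s) 2 ≠ 0 then false
       else
         (pvSubsetSums (PySem.List.slice (PySem.List.slice x (some 1) (some (k + 1))) none
             (some (PySem.Int.floordiv (((PySem.List.slice x (some 1) (some (k + 1))).length : Int)) 2)))).any
           (fun a => PySem.Set.contains
             (pvSubsetSums (PySem.List.slice (PySem.List.slice x (some 1) (some (k + 1)))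
               (some (PySem.Int.floordiv (((PySem.List.slice x (some 1) (some (k + 1))).length : Int)) 2)) none))
             (PySem.Int.floordiv (summ - s) 2 - a))) := rfl
  rw [hB]
  by_cases hmod : PySem.Int.mod (summ - s) 2 = 0
  · rw [if_neg (by simpa using hmod)]
    set vals := PySem.List.slice x (some 1) (some (k + 1)) with hvals
    have htgt : PySem.Int.floordiv (summ - s) 2 * 2 = summ - s := by
      have h := PySem.Int.floordiv_mul_add_mod (summ - s) 2
      omega
    have hmid : PySem.Int.floordiv ((vals.length : Int)) 2 = ((vals.length / 2 : Nat) : Int) := by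
      exact_mod_cast PySem.Int.floordiv_natCast vals.length 2
    rw [hmid, PySem.List.slice_to_natCast, PySem.List.slice_from_natCast]
    rw [List.any_eq_true]
    constructor
    · rintro ⟨a, ha, hc⟩
      rw [PySem.Set.contains_iff, mem_pvSubsetSums] at hc
      rw [mem_pvSubsetSums] at ha
      refine ⟨PySem.Int.floordiv (summ - s) 2, ?_, by omega⟩
      rw [← List.take_append_drop (vals.length / 2) vals, pvCanSum_append]
      exact ⟨a, ha, hc⟩
    · rintro ⟨t, hc, ht⟩
      have htt : t = PySem.Int.floordiv (summ - s) 2 := by omega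
      subst htt
      rw [← List.take_append_drop (vals.length / 2) vals, pvCanSum_append] at hc
      obtain ⟨a, ha, hb⟩ := hc
      refine ⟨a, ?_, ?_⟩
      · rw [mem_pvSubsetSums]; exact ha
      · rw [PySem.Set.contains_iff, mem_pvSubsetSums]; exact hb
  · rw [if_pos (by simpa using hmod)]
    simp only [Bool.false_eq_true, false_iff]
    rintro ⟨t, _, ht⟩
    exact hmod ((PySem.Int.mod_eq_zero_iff_dvd (summ - s) 2).mpr ⟨t, by omega⟩)

-- setting index n+1 does not change the segment x[1..n]
theorem pv_seg_set (l : List Int) (n : Nat) (w : Int) :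
    ((l.set (n + 1) w).drop 1).take n = (l.drop 1).take n := by
  rw [List.drop_set]
  simp only [show ¬ (n + 1 < 1) from by omega, if_false, Nat.add_sub_cancel]
  rw [List.take_set]
  exact List.set_eq_of_length_le (by simp)

-- characterization of A on 0 ≤ k < len x
theorem A_char (s : Int) : ∀ (n : Nat) (x : List Int) (summ : Int), n < x.length →
    (recurce_func (n : Int) summ s x = true ↔
      ∃ t, pvCanSum ((x.drop 1).take n) t ∧ summ - 2 * t = s) := by
  intro n
  induction n with
  | zero =>
    intro x summ _
    rw [recurce_func]
    simp only [Nat.cast_zero, List.take_zero]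
    by_cases hs : summ = s
    · rw [if_pos hs]
      simp only [true_iff]
      exact ⟨0, rfl, by omega⟩
    · rw [if_neg hs]
      simp only [if_true, decide_eq_true_eq]
      constructor
      · intro h; exact absurd h hs
      · rintro ⟨t, ht0, ht⟩
        simp only [pvCanSum] at ht0
        subst ht0
        exact absurd (by omega : summ = s) hs
  | succ n ih =>
    intro x summ hlen
    have hk0 : ((n + 1 : Nat) : Int) ≠ 0 := by push_cast; omega
    have hget : PySem.List.pyGet? x ((n + 1 : Nat) : Int) = some (x[n + 1]) := by
      rw [PySem.List.pyGet?_natCast]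
      exact List.getElem?_eq_getElem hlen
    have hk1 : ((n + 1 : Nat) : Int) - 1 = (n : Int) := by push_cast; ring
    have hset : ∀ w : Int, PySem.List.pySetD x ((n + 1 : Nat) : Int) w = x.set (n + 1) w :=
      fun w => PySem.List.pySetD_natCast x (n + 1) w
    -- the flipped-back list
    have hset2 : ∀ w w' : Int,
        PySem.List.pySetD (x.set (n + 1) w) ((n + 1 : Nat) : Int) w' = (x.set (n + 1) w).set (n + 1) w' :=
      fun w w' => PySem.List.pySetD_natCast _ (n + 1) w'
    -- both recursive calls run on lists whose x[1..n] segment equals x's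
    have hseg1 : (((x.set (n + 1) (-(x[n + 1]))).drop 1)).take n = (x.drop 1).take n :=
      pv_seg_set x n _
    have hseg2 : ((((x.set (n + 1) (-(x[n + 1]))).set (n + 1) (x[n + 1])).drop 1)).take n = (x.drop 1).take n := by
      rw [pv_seg_set, pv_seg_set]
    have hlen1 : n < (x.set (n + 1) (-(x[n + 1]))).length := by simp; omega
    have hlen2 : n < ((x.set (n + 1) (-(x[n + 1]))).set (n + 1) (x[n + 1])).length := by simp; omega
    have ih1 := ih (x.set (n + 1) (-(x[n + 1]))) (summ + 2 * (-(x[n + 1]))) hlen1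
    have ih2 := ih ((x.set (n + 1) (-(x[n + 1]))).set (n + 1) (x[n + 1])) summ hlen2
    rw [hseg1] at ih1
    rw [hseg2] at ih2
    -- the segment grows by x[n+1] on the right
    have hconcat : (x.drop 1).take (n + 1) = (x.drop 1).take n ++ [x[n + 1]] := by
      rw [List.take_add_one]
      congr 1
      have hd : (x.drop 1)[n]? = some (x[n + 1]) := by
        rw [List.getElem?_drop, show 1 + n = n + 1 from by omega]
        exact List.getElem?_eq_getElem hlen
      rw [hd]; rfl
    rw [recurce_func]
    by_cases hs : summ = s
    · rw [if_pos hs]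
      simp only [true_iff]
      exact ⟨0, pvCanSum_zero _, by omega⟩
    · rw [if_neg hs, if_neg hk0, hget]
      simp only [hset, hset2, hk1]
      rw [hconcat]
      constructor
      · intro h
        split_ifs at h with h1 h2
        · obtain ⟨t, hc, ht⟩ := ih1.mp h1
          refine ⟨t + x[n + 1], ?_, by omega⟩
          rw [pvCanSum_concat]
          left
          rwa [show t + x[n + 1] - x[n + 1] = t from by ring]
        · obtain ⟨t, hc, ht⟩ := ih2.mp h2
          refine ⟨t, ?_, ht⟩
          rw [pvCanSum_concat]
          right
          exact hc
      · rintro ⟨t, hc, ht⟩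
        rw [pvCanSum_concat] at hc
        rcases hc with hc | hc
        · have h1 : recurce_func (n : Int) (summ + 2 * (-(x[n + 1]))) s (x.set (n + 1) (-(x[n + 1]))) = true :=
            ih1.mpr ⟨t - x[n + 1], hc, by omega⟩
          rw [if_pos h1]
        · have h2 : recurce_func (n : Int) summ s ((x.set (n + 1) (-(x[n + 1]))).set (n + 1) (x[n + 1])) = true :=
            ih2.mpr ⟨t, hc, by omega⟩
          split_ifs <;> simp_all

-- ===== VERDICT (by name: the statement is the Claim_ definition above) =====
theorem recurce_func_spec : Claim_equal_recurce_func := by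
  intro k summ s x _ hpre
  unfold Spec_recurce_func
  rw [Bool.eq_iff_iff, B_char]
  by_cases hs : summ = s
  · rw [recurce_func, if_pos hs]
    simp only [true_iff]
    exact ⟨0, pvCanSum_zero _, by omega⟩
  · rcases hpre with hs' | hk0 | ⟨hk0, hkl⟩
    · exact absurd hs' hs
    · subst hk0
      have hsl : PySem.List.slice x (some 1) (some ((0 : Int) + 1)) = [] := by
        rw [show ((0 : Int) + 1) = ((1 : Nat) : Int) from by norm_num,
            show (1 : Int) = ((1 : Nat) : Int) from rfl, PySem.List.slice_natCast]
        simp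
      rw [hsl, recurce_func, if_neg hs, if_pos rfl]
      simp only [decide_eq_true_eq]
      constructor
      · intro h; exact absurd h hs
      · rintro ⟨t, ht0, ht⟩
        simp only [pvCanSum] at ht0
        subst ht0
        exact absurd (by omega : summ = s) hs
    · obtain ⟨n, rfl⟩ := Int.eq_ofNat_of_zero_le hk0
      have hlen : n < x.length := by exact_mod_cast hkl
      rw [A_char s n x summ hlen]
      have hsl : PySem.List.slice x (some 1) (some ((n : Int) + 1)) = (x.drop 1).take n := by
        rw [show ((n : Int) + 1) = ((n + 1 : Nat) : Int) from by push_cast; ring,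
            show (1 : Int) = ((1 : Nat) : Int) from rfl, PySem.List.slice_natCast]
        simp
      rw [hsl]
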